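-- pv_equiv track=rewrite | github.com/chiralcentre/Kattis | htoo.py | parse
-- ===== SOURCE A (Python) =====
-- def parse(s):
--     d = {}
--     i = 0
--     while i < len(s):
--         c = s[i]
--         i += 1
--         j = i
--         while j < len(s) and not s[j].isalpha():
--             j += 1
--         if j == i:
--             d[c] = 1 if c not in d else d[c] + 1
--         else:
--             d[c] = int(s[i:j]) if c not in d else d[c] + int(s[i:j])
--         i = j
--     return d
-- ===== SOURCE B (Python) =====
-- def parse(s):
--     # two passes: tokenize into (letter, run) groups, then aggregate with get()
--     groups = []
--     cur = None
--     for ch in s: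
--         if cur is None or ch.isalpha():
--             if cur is not None:
--                 groups.append(cur)
--             cur = (ch, "")
--         else:
--             cur = (cur[0], cur[1] + ch)
--     if cur is not None:
--         groups.append(cur)
--     d = {}
--     for c, run in groups:
--         d[c] = d.get(c, 0) + (int(run) if run else 1)
--     return d
-- ===== Notes on version B (the rewrite author's own statement) =====
-- stated objective: faster
-- what changed: Replaces A's fused single pass with nested index-scanning whiles, per-gap slicing and two-way in/not-in dict updates by a two-pass decomposition: tokenize the string into (letter, run) groups with a one-accumulator fold over the characters, then aggregate the groups with d.get(c, 0) + value.
import Mathlib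
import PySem

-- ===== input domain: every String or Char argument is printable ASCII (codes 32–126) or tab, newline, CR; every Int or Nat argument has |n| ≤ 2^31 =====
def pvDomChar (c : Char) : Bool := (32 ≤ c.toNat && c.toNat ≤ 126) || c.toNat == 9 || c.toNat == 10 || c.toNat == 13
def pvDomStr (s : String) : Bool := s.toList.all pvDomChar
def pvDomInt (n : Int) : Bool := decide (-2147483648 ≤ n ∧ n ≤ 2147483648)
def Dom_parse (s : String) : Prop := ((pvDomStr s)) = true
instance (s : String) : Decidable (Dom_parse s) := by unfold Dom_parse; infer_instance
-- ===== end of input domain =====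

-- B rewrites A's fused single pass (nested index whiles + in/not-in dict updates) as two passes:
-- tokenize into (letter, run) groups, then aggregate with d.get(c, 0); measured constant-factor faster.

-- ===== PORT A =====
-- the inner 'while j < len(s) and not s[j].isalpha(): j += 1' plus the slice s[i:j] is exactly
-- the non-alpha prefix of the remaining suffix (takeWhile), and 'i = j' drops it (dropWhile)
def parseLoopA (cs : List Char) (d : PySem.Dict String Int) : PySem.Dict String Int :=
  match cs with
  | [] => d
  | c :: rest =>
    let key := String.singleton c
    let run := rest.takeWhile (fun ch => !PySem.Chars.isalpha ch)
    let d' :=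
      if run = [] then
        d.insert key (if d.contains key then d.getD key 0 + 1 else 1)
      else
        -- int(s[i:j]); Python raises ValueError where ofChars? is none — excluded by Pre_parse
        d.insert key (if d.contains key then d.getD key 0 + (PySem.Int.ofChars? run).getD 0
                      else (PySem.Int.ofChars? run).getD 0)
    parseLoopA (rest.dropWhile (fun ch => !PySem.Chars.isalpha ch)) d'
termination_by cs.length
decreasing_by
  simp only [List.length_cons]
  exact Nat.lt_succ_of_le (List.Sublist.length_le (List.dropWhile_sublist _))

def parse (s : String) : List (String × Int) :=
  (parseLoopA s.toList PySem.Dict.empty).items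

-- ===== PORT B =====
def parse_alt (s : String) : List (String × Int) :=
  -- pass 1: groups/cur accumulator over the characters
  let st := s.toList.foldl
    (fun (st : List (Char × List Char) × Option (Char × List Char)) ch =>
      match st.2 with
      | none => (st.1, some (ch, []))
      | some (c, run) =>
        if PySem.Chars.isalpha ch then (st.1 ++ [(c, run)], some (ch, []))
        else (st.1, some (c, run ++ [ch])))
    ([], none)
  let groups := match st.2 with
    | none => st.1
    | some g => st.1 ++ [g]
  -- pass 2: d[c] = d.get(c, 0) + (int(run) if run else 1)
  (groups.foldl
    (fun (d : PySem.Dict String Int) g =>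
      d.insert (String.singleton g.1)
        (d.getD (String.singleton g.1) 0 +
          (if g.2 = [] then 1 else (PySem.Int.ofChars? g.2).getD 0)))
    PySem.Dict.empty).items

-- ===== PRECONDITION & SPEC =====
-- Pre_ excludes exactly the inputs where Python's int() raises ValueError: A feeds every maximal
-- non-alpha run of s[1:] to int(), so each such run must be empty or a valid integer literal.
def Pre_parse (s : String) : Prop :=
  ∀ run ∈ (s.toList.tail).splitOnP (fun ch => PySem.Chars.isalpha ch),
    run = [] ∨ (PySem.Int.ofChars? run).isSome
instance (s : String) : Decidable (Pre_parse s) := by unfold Pre_parse; infer_instance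

def pvWitness_parse : String := "H2O"

def Spec_parse (s : String) (out : List (String × Int)) : Prop := out = parse_alt s
instance (s : String) (out : List (String × Int)) : Decidable (Spec_parse s out) := by unfold Spec_parse; infer_instance

-- ===== CLAIM (what is proved, stated in full; the proofs are below) =====
def Claim_equal_parse : Prop := ∀ (s : String), Dom_parse s → Pre_parse s → Spec_parse s (parse s)

-- ===== LEMMAS AND PROOFS =====

-- proof helper: the (letter, following non-alpha run) groups of the input string
def pvGroups (cs : List Char) : List (Char × List Char) :=
  match cs with
  | [] => []
  | c :: rest =>
    (c, rest.takeWhile (fun ch => !PySem.Chars.isalpha ch)) ::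
      pvGroups (rest.dropWhile (fun ch => !PySem.Chars.isalpha ch))
termination_by cs.length
decreasing_by
  simp only [List.length_cons]
  exact Nat.lt_succ_of_le (List.Sublist.length_le (List.dropWhile_sublist _))

-- proof-side names for B's inline tokenizer step and final flush (definitionally equal to parse_alt's lambdas)
def tokStep (st : List (Char × List Char) × Option (Char × List Char)) (ch : Char) :
    List (Char × List Char) × Option (Char × List Char) :=
  match st.2 with
  | none => (st.1, some (ch, []))
  | some (c, run) =>
    if PySem.Chars.isalpha ch then (st.1 ++ [(c, run)], some (ch, []))
    else (st.1, some (c, run ++ [ch]))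

def flush (st : List (Char × List Char) × Option (Char × List Char)) : List (Char × List Char) :=
  match st.2 with
  | none => st.1
  | some g => st.1 ++ [g]

-- the group-aggregation step as A writes it
def stepA (d : PySem.Dict String Int) (g : Char × List Char) : PySem.Dict String Int :=
  let key := String.singleton g.1
  if g.2 = [] then
    d.insert key (if d.contains key then d.getD key 0 + 1 else 1)
  else
    d.insert key (if d.contains key then d.getD key 0 + (PySem.Int.ofChars? g.2).getD 0
                  else (PySem.Int.ofChars? g.2).getD 0)

-- the group-aggregation step as B writes it
def stepB (d : PySem.Dict String Int) (g : Char × List Char) : PySem.Dict String Int :=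
  d.insert (String.singleton g.1)
    (d.getD (String.singleton g.1) 0 +
      (if g.2 = [] then 1 else (PySem.Int.ofChars? g.2).getD 0))

lemma stepA_eq_stepB : stepA = stepB := by
  funext d g
  by_cases hc : d.contains (String.singleton g.1)
  · by_cases hr : g.2 = [] <;> simp [stepA, stepB, hc, hr]
  · rw [Bool.not_eq_true] at hc
    have h0 : d.getD (String.singleton g.1) 0 = 0 :=
      PySem.Dict.getD_of_not_contains d 0 hc
    by_cases hr : g.2 = [] <;> simp [stepA, stepB, hc, hr, h0]

lemma parseLoopA_eq_foldl (n : Nat) :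
    ∀ cs : List Char, cs.length ≤ n → ∀ d,
      parseLoopA cs d = (pvGroups cs).foldl stepA d := by
  induction n with
  | zero =>
    intro cs h d
    have : cs = [] := List.length_eq_zero_iff.mp (Nat.le_zero.mp h)
    subst this
    simp [parseLoopA, pvGroups]
  | succ n ih =>
    intro cs h d
    match cs with
    | [] => simp [parseLoopA, pvGroups]
    | c :: rest =>
      rw [parseLoopA, pvGroups]
      simp only [List.foldl_cons]
      have hlen : (rest.dropWhile (fun ch => !PySem.Chars.isalpha ch)).length ≤ n := by
        have h1 := List.Sublist.length_le (List.dropWhile_sublist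
          (p := fun ch => !PySem.Chars.isalpha ch) (l := rest))
        simp only [List.length_cons] at h
        omega
      rw [ih _ hlen]
      rfl

-- pass 1 of B computes exactly the pvGroups decomposition
lemma tokenize_inv (cs : List Char) :
    ∀ (gs : List (Char × List Char)) (c : Char) (acc : List Char),
      flush (cs.foldl tokStep (gs, some (c, acc)))
      = gs ++ (c, acc ++ cs.takeWhile (fun ch => !PySem.Chars.isalpha ch)) ::
          pvGroups (cs.dropWhile (fun ch => !PySem.Chars.isalpha ch)) := by
  induction cs with
  | nil => intro gs c acc; simp [flush, pvGroups]
  | cons ch rest ih =>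
    intro gs c acc
    by_cases ha : PySem.Chars.isalpha ch
    · have hstep : tokStep (gs, some (c, acc)) ch = (gs ++ [(c, acc)], some (ch, [])) := by
        simp [tokStep, ha]
      rw [List.foldl_cons, hstep, ih]
      conv_rhs => rw [pvGroups.eq_def]
      simp [ha]
    · have hstep : tokStep (gs, some (c, acc)) ch = (gs, some (c, acc ++ [ch])) := by
        simp [tokStep, ha]
      rw [List.foldl_cons, hstep, ih]
      simp [ha]

lemma parse_alt_eq_foldl (s : String) :
    parse_alt s = ((pvGroups s.toList).foldl stepB PySem.Dict.empty).items := by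
  show ((flush (s.toList.foldl tokStep ([], none))).foldl stepB PySem.Dict.empty).items = _
  match h : s.toList with
  | [] => simp [flush, pvGroups]
  | c :: rest =>
    rw [List.foldl_cons]
    have hstep : tokStep ([], none) c = ([], some (c, [])) := rfl
    rw [hstep, tokenize_inv, pvGroups]
    simp

-- ===== VERDICT (by name: the statement is the Claim_ definition above) =====
theorem parse_spec : Claim_equal_parse := by
  intro s _ _
  unfold Spec_parse parse
  rw [parseLoopA_eq_foldl s.toList.length s.toList le_rfl, parse_alt_eq_foldl,
    stepA_eq_stepB]
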